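-- pv_equiv track=rewrite | github.com/vbscharan/DSA | Half N by M - GFG/half-n-by-m.py | mthHalf
-- ===== SOURCE A (Python) =====
-- def mthHalf(N, M):
--     # code here
--     k=1
--     while k<=(M-1):
--         if N==0:
--             return 0
--         N//=2
--         k+=1
--     return N
-- ===== SOURCE B (Python) =====
-- def mthHalf(N, M):
--     # single arithmetic right shift instead of a loop of M-1 floor divisions
--     return N >> (M - 1) if M > 1 else N
-- ===== Notes on version B (the rewrite author's own statement) =====
-- stated objective: faster
-- what changed: Replaces the loop of M-1 repeated floor divisions by a single arithmetic right shift N >> (M-1).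
import Mathlib
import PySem

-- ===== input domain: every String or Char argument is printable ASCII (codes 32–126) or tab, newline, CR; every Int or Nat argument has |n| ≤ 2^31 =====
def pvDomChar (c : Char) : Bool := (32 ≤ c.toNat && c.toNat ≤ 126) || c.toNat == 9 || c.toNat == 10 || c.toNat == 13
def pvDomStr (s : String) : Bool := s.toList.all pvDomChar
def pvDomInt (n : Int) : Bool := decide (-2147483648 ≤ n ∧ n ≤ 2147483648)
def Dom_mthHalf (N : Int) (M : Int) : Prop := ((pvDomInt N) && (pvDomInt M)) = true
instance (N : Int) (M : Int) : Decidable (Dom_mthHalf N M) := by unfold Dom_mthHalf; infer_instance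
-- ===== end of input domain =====

-- B replaces A's loop of M-1 repeated floor divisions by a single arithmetic right shift (asymptotically faster).


-- ===== PORT A =====
-- while k <= M-1: if N == 0: return 0; N //= 2; k += 1
def mthHalfLoop (M : Int) (N : Int) (k : Int) : Int :=
  if _h : k ≤ M - 1 then
    if N = 0 then 0
    else mthHalfLoop M (PySem.Int.floordiv N 2) (k + 1)
  else N
termination_by (M - k).toNat
decreasing_by omega

def mthHalf (N : Int) (M : Int) : Int := mthHalfLoop M N 1

-- ===== PORT B =====
def mthHalf_alt (N : Int) (M : Int) : Int :=
  if 1 < M then N >>> (M - 1).toNat else N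

-- ===== PRECONDITION & SPEC =====
def Spec_mthHalf (N : Int) (M : Int) (out : Int) : Prop := out = mthHalf_alt N M
instance (N : Int) (M : Int) (out : Int) : Decidable (Spec_mthHalf N M out) := by unfold Spec_mthHalf; infer_instance

-- ===== CLAIM (what is proved, stated in full; the proofs are below) =====
def Claim_equal_mthHalf : Prop := ∀ (N : Int) (M : Int), Dom_mthHalf N M → Spec_mthHalf N M (mthHalf N M)

-- ===== LEMMAS AND PROOFS =====

-- A's loop performs (M - k)⁺ floor divisions by 2, i.e. divides by 2 ^ (M - k).toNat.
theorem mthHalfLoop_eq_fdiv_pow (M N k : Int) :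
    mthHalfLoop M N k = Int.fdiv N (2 ^ (M - k).toNat) := by
  generalize hj : (M - k).toNat = j
  induction j generalizing N k with
  | zero =>
    rw [mthHalfLoop]
    have hk : ¬ k ≤ M - 1 := by omega
    simp [hk]
  | succ j ih =>
    rw [mthHalfLoop]
    have hk : k ≤ M - 1 := by omega
    by_cases hN : N = 0
    · simp [hk, hN, Int.zero_fdiv]
    · have hj' : (M - (k + 1)).toNat = j := by omega
      have : PySem.Int.floordiv N 2 = Int.fdiv N 2 := rfl
      simp only [hk, hN, if_false, ih _ _ hj', this]
      rw [Int.fdiv_fdiv_eq_fdiv_mul N (by norm_num) (by positivity)]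
      rw [pow_succ, mul_comm]
      simp

-- Arithmetic right shift is floor division by the power of two.
theorem shiftRight_eq_fdiv_pow (n : Int) (j : Nat) : n >>> j = Int.fdiv n (2 ^ j) := by
  rw [Int.shiftRight_eq_div_pow]
  have : Int.fdiv n (2 ^ j) = PySem.Int.floordiv n (2 ^ j) := rfl
  rw [this, PySem.Int.floordiv_eq_ediv_of_pos (by positivity)]
  push_cast
  rfl

-- ===== VERDICT (by name: the statement is the Claim_ definition above) =====
theorem mthHalf_spec : Claim_equal_mthHalf := by
  intro N M _
  unfold Spec_mthHalf mthHalf mthHalf_alt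
  rw [mthHalfLoop_eq_fdiv_pow]
  by_cases hM : 1 < M
  · simp only [hM, if_true, shiftRight_eq_fdiv_pow]
  · have h0 : (M - 1).toNat = 0 := by omega
    simp [hM, h0, Int.fdiv_one]
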